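-- pv_equiv track=rewrite | github.com/suarez-va/TIDES | src/tides/basis_utils.py | _occ_sort
-- ===== SOURCE A (Python) =====
-- def _occ_sort(occ_list):
--     nocc = []
--     nvirt = []
--     for idx, occ in enumerate(occ_list):
--         if occ > 0:
--             nocc.append(idx)
--         else:
--             nvirt.append(idx)
--     return tuple(nocc + nvirt)
-- ===== SOURCE B (Python) =====
-- def _occ_sort(occ_list):
--     return tuple(sorted(range(len(occ_list)), key=lambda i: not (occ_list[i] > 0)))
-- ===== Notes on version B (the rewrite author's own statement) =====
-- stated objective: idiomatic
-- what changed: Replaces the explicit two-bucket partition loop with a single stable sort of the index range keyed by the boolean 'not occupied', relying on sort stability to keep original order within each group.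
import Mathlib
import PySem

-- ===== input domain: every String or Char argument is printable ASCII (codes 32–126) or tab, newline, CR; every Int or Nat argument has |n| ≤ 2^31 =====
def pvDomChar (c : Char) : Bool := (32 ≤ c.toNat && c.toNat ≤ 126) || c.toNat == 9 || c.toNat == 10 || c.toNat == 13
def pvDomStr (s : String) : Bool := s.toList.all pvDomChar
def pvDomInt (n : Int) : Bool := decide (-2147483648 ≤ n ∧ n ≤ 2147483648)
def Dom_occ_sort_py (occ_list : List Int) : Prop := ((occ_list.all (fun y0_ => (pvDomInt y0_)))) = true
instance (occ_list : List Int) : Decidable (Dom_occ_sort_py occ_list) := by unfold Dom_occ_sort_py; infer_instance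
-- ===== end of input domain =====

-- B replaces A's explicit two-bucket partition loop by a stable sort of the index
-- range keyed by "not occupied" (same values; different decomposition, not faster).


-- ===== PORT A =====
-- literal port: one pass over enumerate(occ_list), appending each index to nocc or nvirt
def occ_sort_py (occ_list : List Int) : List Int :=
  let st := (PySem.List.enumerate occ_list 0).foldl
    (fun (p : List Int × List Int) iv =>
      if iv.2 > 0 then (p.1 ++ [iv.1], p.2) else (p.1, p.2 ++ [iv.1]))
    ([], [])
  st.1 ++ st.2

-- ===== PORT B =====
-- literal port of Source B: stable sort of range(len(occ_list)) keyed by not(occ>0);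
-- the Python bool key False/True is ported as the Int 0/1 it compares as
def occ_sort_py_alt (occ_list : List Int) : List Int :=
  PySem.List.sorted (PySem.List.pyRange 0 occ_list.length 1)
    (fun i => if PySem.List.pyGetD occ_list i 0 > 0 then (0 : Int) else 1) false

-- ===== PRECONDITION & SPEC =====
def Spec_occ_sort_py (occ_list : List Int) (out : List Int) : Prop := out = occ_sort_py_alt occ_list
instance (occ_list : List Int) (out : List Int) : Decidable (Spec_occ_sort_py occ_list out) := by unfold Spec_occ_sort_py; infer_instance

-- ===== CLAIM (what is proved, stated in full; the proofs are below) =====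
def Claim_equal_occ_sort_py : Prop := ∀ (occ_list : List Int), Dom_occ_sort_py occ_list → Spec_occ_sort_py occ_list (occ_sort_py occ_list)

-- ===== LEMMAS AND PROOFS =====

theorem pv_pyGetD_cons_pos (x : Int) (l : List Int) (k : Int) (d : Int) (hk : 0 < k) :
    PySem.List.pyGetD (x :: l) k d = PySem.List.pyGetD l (k - 1) d := by
  obtain ⟨m, rfl⟩ := Int.eq_ofNat_of_zero_le hk.le
  cases m with
  | zero => omega
  | succ m' =>
    have h1 : ((m' + 1 : Nat) : Int) - 1 = (m' : Int) := by push_cast; ring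
    rw [h1, PySem.List.pyGetD_natCast, PySem.List.pyGetD_natCast]
    simp [List.getD]

theorem pv_enum_fst_ge (l : List Int) : ∀ (s : Int) (q : Int × Int),
    q ∈ PySem.List.enumerate l s → s ≤ q.1 := by
  induction l with
  | nil => intro s q hq; simp [PySem.List.enumerate_nil] at hq
  | cons x t ih =>
    intro s q hq
    rw [PySem.List.enumerate_cons, List.mem_cons] at hq
    rcases hq with hq | hq
    · subst hq; exact le_refl _
    · have := ih (s + 1) q hq; omega

theorem pv_enum_get (l : List Int) : ∀ (s : Int) (q : Int × Int),
    q ∈ PySem.List.enumerate l s → PySem.List.pyGetD l (q.1 - s) 0 = q.2 := by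
  induction l with
  | nil => intro s q hq; simp [PySem.List.enumerate_nil] at hq
  | cons x t ih =>
    intro s q hq
    rw [PySem.List.enumerate_cons, List.mem_cons] at hq
    rcases hq with hq | hq
    · subst hq; simp [PySem.List.pyGetD, PySem.List.pyGet?, PySem.List.pyIdx?]
    · have hge : s + 1 ≤ q.1 := pv_enum_fst_ge t (s + 1) q hq
      have := ih (s + 1) q hq
      rw [pv_pyGetD_cons_pos x t (q.1 - s) 0 (by omega)]
      have h2 : q.1 - s - 1 = q.1 - (s + 1) := by ring
      rw [h2, this]

theorem pv_Afold (l : List (Int × Int)) (A B : List Int) :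
    l.foldl (fun (p : List Int × List Int) iv =>
        if iv.2 > 0 then (p.1 ++ [iv.1], p.2) else (p.1, p.2 ++ [iv.1])) (A, B)
      = (A ++ (l.filter (fun q => decide (q.2 > 0))).map Prod.fst,
         B ++ (l.filter (fun q => !decide (q.2 > 0))).map Prod.fst) := by
  induction l generalizing A B with
  | nil => simp
  | cons iv t ih =>
    by_cases h : iv.2 > 0
    · simp only [List.foldl_cons, List.filter_cons, h]
      rw [ih]; simp
    · simp only [List.foldl_cons, List.filter_cons, h]
      rw [ih]; simp

theorem pv_insert_mid (bef : Int → Int → Bool) (A B : List Int) (x : Int)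
    (hA : ∀ a ∈ A, bef x a = false) (hB : ∀ b ∈ B, bef x b = true) :
    PySem.List.insertBy bef x (A ++ B) = A ++ x :: B := by
  induction A with
  | nil =>
    cases B with
    | nil => simp [PySem.List.insertBy]
    | cons b B' => simp [PySem.List.insertBy, hB b (by simp)]
  | cons a A' ih =>
    have ha : bef x a = false := hA a (by simp)
    have ih' := ih (fun a' ha' => hA a' (by simp [ha']))
    simp [PySem.List.insertBy, ha, ih']

theorem pv_Bfold (key : Int → Int) (hk : ∀ x, key x = 0 ∨ key x = 1)
    (l : List Int) : ∀ (A B : List Int), (∀ a ∈ A, key a = 0) → (∀ b ∈ B, key b = 1) →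
    l.foldl (fun acc x => PySem.List.insertBy (fun a b => decide (key a < key b)) x acc) (A ++ B)
      = (A ++ l.filter (fun x => key x == 0)) ++ (B ++ l.filter (fun x => !(key x == 0))) := by
  induction l with
  | nil => intro A B _ _; simp
  | cons x t ih =>
    intro A B hA hB
    simp only [List.foldl_cons]
    rcases hk x with h0 | h1
    · rw [pv_insert_mid _ A B x
        (fun a ha => by simp [h0, hA a ha])
        (fun b hb => by simp [h0, hB b hb])]
      have : A ++ x :: B = (A ++ [x]) ++ B := by simp
      rw [this, ih (A ++ [x]) B
        (by intro a ha; rcases List.mem_append.mp ha with h | h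
            · exact hA a h
            · simp at h; subst h; exact h0) hB]
      simp [h0]
    · rw [PySem.List.insertBy_of_forall_not_before _ _ _
        (fun y hy => by
          rcases List.mem_append.mp hy with h | h
          · simp [h1, hA y h]
          · simp [h1, hB y h])]
      have : (A ++ B) ++ [x] = A ++ (B ++ [x]) := by simp
      rw [this, ih A (B ++ [x]) hA
        (by intro b hb; rcases List.mem_append.mp hb with h | h
            · exact hB b h
            · simp at h; subst h; exact h1)]
      simp only [List.filter_cons, h1]
      simp

theorem pv_bridge (l : List Int) (p : Int → Bool) :
    (PySem.List.pyRange 0 l.length 1).filter (fun i => p (PySem.List.pyGetD l i 0))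
      = ((PySem.List.enumerate l 0).filter (fun q => p q.2)).map Prod.fst := by
  have hm : (PySem.List.enumerate l 0).map Prod.fst = PySem.List.pyRange 0 l.length 1 := by
    rw [PySem.List.map_fst_enumerate]; norm_num
  rw [← hm, List.filter_map]
  congr 1
  apply List.filter_congr
  intro q hq
  have := pv_enum_get l 0 q hq
  simp only [Function.comp]
  rw [show q.1 - 0 = q.1 by ring] at this
  rw [this]

-- ===== VERDICT (by name: the statement is the Claim_ definition above) =====
theorem occ_sort_py_spec : Claim_equal_occ_sort_py := by
  intro l _
  unfold Spec_occ_sort_py occ_sort_py occ_sort_py_alt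
  set key : Int → Int := fun i => if PySem.List.pyGetD l i 0 > 0 then (0 : Int) else 1 with hkey
  have hk : ∀ x, key x = 0 ∨ key x = 1 := by
    intro x; by_cases h : PySem.List.pyGetD l x 0 > 0 <;> simp [hkey, h]
  rw [PySem.List.sorted_eq_foldl_insertBy]
  have hB := pv_Bfold key hk (PySem.List.pyRange 0 l.length 1) [] [] (by simp) (by simp)
  simp only [List.nil_append] at hB
  rw [hB]
  rw [pv_Afold (PySem.List.enumerate l 0) [] []]
  have hf0 : (fun x => key x == 0) = (fun i => decide (PySem.List.pyGetD l i 0 > 0)) := by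
    funext x; by_cases h : PySem.List.pyGetD l x 0 > 0 <;> simp [hkey, h]
  have hf1 : (fun x => !(key x == 0)) = (fun i => !decide (PySem.List.pyGetD l i 0 > 0)) := by
    funext x; by_cases h : PySem.List.pyGetD l x 0 > 0 <;> simp [hkey, h]
  rw [hf0, hf1, pv_bridge l (fun v => decide (v > 0)),
      pv_bridge l (fun v => !decide (v > 0))]
  simp
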